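-- pv_equiv track=rewrite | github.com/waitiaw/LintCode | Rtu/LintCode/day1.py | solve
-- ===== SOURCE A (Python) =====
-- from typing import (
--     List,
-- )
--
-- def solve(nums: List[int], queries: List[List[int]]) -> List[int]:
--     result = []
--     # 첫번째 index와 증가하는 index를 추출
--     for query in queries:
--         total = 0
--         index = query[0]
--         add_index = query[1]
--         # while문을 통해서 nums의 길이를 넘지 않는 선에서 index를 증가하면서 값을 더한다.
--         while index < len(nums):
--             value = nums[index]
--             total += value
--             index += add_index
--         result.append(total)
--     return result
-- ===== SOURCE B (Python) =====
-- # Frequency-driven stride decomposition: a stride that occurs more often than its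
-- # size gets a shared stride-suffix-sum table built once, answering each of its
-- # queries in O(1); other queries are scanned directly.
-- def solve(nums, queries):
--     n = len(nums)
--     freq = {}
--     for q in queries:
--         freq[q[1]] = freq.get(q[1], 0) + 1
--     cache = {}
--     result = []
--     for q in queries:
--         start = q[0]
--         step = q[1]
--         if 0 <= start and 1 <= step < freq[step]:
--             if step not in cache:
--                 suf = [0] * (n + step)
--                 for i in range(n - 1, -1, -1):
--                     suf[i] = nums[i] + suf[i + step]
--                 cache[step] = suf
--             result.append(cache[step][start] if start < n else 0)
--         else:
--             total = 0
--             i = start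
--             while i < n:
--                 total += nums[i]
--                 i += step
--             result.append(total)
--     return result
-- ===== Notes on version B (the rewrite author's own statement) =====
-- stated objective: alternative
-- what changed: B first counts how often each stride occurs and builds one shared stride-suffix-sum table per stride that occurs more often than its size, answering those queries by a single table lookup; infrequent strides and edge starts are scanned directly; Pre_ excludes only inputs where A raises or loops forever (queries shorter than 2, start below -len, or a nonpositive stride with start < len).
import Mathlib
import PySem

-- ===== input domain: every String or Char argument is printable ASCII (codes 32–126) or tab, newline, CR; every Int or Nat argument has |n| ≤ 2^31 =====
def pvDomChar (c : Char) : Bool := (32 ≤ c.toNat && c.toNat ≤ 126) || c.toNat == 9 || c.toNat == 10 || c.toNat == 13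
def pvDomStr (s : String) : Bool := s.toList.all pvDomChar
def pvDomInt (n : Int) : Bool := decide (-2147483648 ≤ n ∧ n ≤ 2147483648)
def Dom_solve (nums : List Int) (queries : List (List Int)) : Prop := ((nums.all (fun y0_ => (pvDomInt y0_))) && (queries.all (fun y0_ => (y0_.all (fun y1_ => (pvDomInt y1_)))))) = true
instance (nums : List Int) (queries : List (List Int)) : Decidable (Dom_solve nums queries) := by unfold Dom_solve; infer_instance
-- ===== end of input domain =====

-- B replaces A's per-query rescan by shared stride-suffix-sum tables for strides
-- occurring more often than their size; infrequent strides are scanned directly.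

-- ===== PORT A =====
-- A's while loop; the fuel 2*len(nums) bounds its iteration count on every input
-- Pre_solve admits (step ≥ 1 and index ≥ -len, or zero iterations).
def whileSumA (nums : List Int) : Nat → Int → Int → Int → Int
  | 0, _, _, total => total
  | f+1, index, step, total =>
    if index < (nums.length : Int) then
      whileSumA nums f (index + step) step (total + PySem.List.pyGetD nums index 0)
    else total

def solve (nums : List Int) (queries : List (List Int)) : List Int :=
  queries.foldl
    (fun result query =>
      result ++ [whileSumA nums (2 * nums.length)
        (PySem.List.pyGetD query 0 0) (PySem.List.pyGetD query 1 0) 0])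
    []

-- ===== PORT B =====
-- suf = [0]*(n+step); for i in range(n-1,-1,-1): suf[i] = nums[i] + suf[i+step]
def buildSuf (nums : List Int) (step : Int) : List Int :=
  (PySem.List.pyRange ((nums.length : Int) - 1) (-1) (-1)).foldl
    (fun suf i =>
      PySem.List.pySetD suf i (PySem.List.pyGetD nums i 0 + PySem.List.pyGetD suf (i + step) 0))
    (List.replicate ((nums.length : Int) + step).toNat 0)

-- B's direct-scan while loop (same fuel bound as in port A)
def whileSumB (nums : List Int) : Nat → Int → Int → Int → Int
  | 0, _, _, total => total
  | f+1, i, step, total =>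
    if i < (nums.length : Int) then
      whileSumB nums f (i + step) step (total + PySem.List.pyGetD nums i 0)
    else total

def solve_alt (nums : List Int) (queries : List (List Int)) : List Int :=
  let n := nums.length
  let freq : PySem.Dict Int Int :=
    queries.foldl (fun d q =>
      let step := PySem.List.pyGetD q 1 0
      d.insert step (d.getD step 0 + 1)) PySem.Dict.empty
  (queries.foldl
    (fun (acc : PySem.Dict Int (List Int) × List Int) q =>
      let cache := acc.1
      let result := acc.2
      let start := PySem.List.pyGetD q 0 0
      let step := PySem.List.pyGetD q 1 0
      if 0 ≤ start ∧ 1 ≤ step ∧ step < freq.getD step 0 then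
        let cache := if cache.contains step then cache else cache.insert step (buildSuf nums step)
        let suf := cache.getD step []
        (cache, result ++ [if start < (n : Int) then PySem.List.pyGetD suf start 0 else 0])
      else
        (cache, result ++ [whileSumB nums (2 * n) start step 0]))
    (PySem.Dict.empty, [])).2

-- ===== PRECONDITION & SPEC =====
-- Pre_solve excludes exactly the inputs on which the Python A does not return:
-- queries shorter than 2 (IndexError), a nonpositive stride with start < len
-- (infinite loop, or IndexError once the index drops below -len), and
-- start < -len with a positive stride (immediate IndexError).
def Pre_solve (nums : List Int) (queries : List (List Int)) : Prop :=
  ∀ q ∈ queries, 2 ≤ q.length ∧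
    ((1 ≤ q.getD 1 0 ∧ -(nums.length : Int) ≤ q.getD 0 0) ∨
     (q.getD 1 0 ≤ 0 ∧ (nums.length : Int) ≤ q.getD 0 0))
instance (nums : List Int) (queries : List (List Int)) : Decidable (Pre_solve nums queries) := by
  unfold Pre_solve; infer_instance

def pvWitness_solve : List Int × List (List Int) := ([1, 2, 3], [[0, 2], [-2, 1], [5, 0]])

def Spec_solve (nums : List Int) (queries : List (List Int)) (out : List Int) : Prop :=
  out = solve_alt nums queries
instance (nums : List Int) (queries : List (List Int)) (out : List Int) :
    Decidable (Spec_solve nums queries out) := by unfold Spec_solve; infer_instance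

-- ===== CLAIM (what is proved, stated in full; the proofs are below) =====
def Claim_equal_solve : Prop := ∀ (nums : List Int) (queries : List (List Int)),
  Dom_solve nums queries → Pre_solve nums queries → Spec_solve nums queries (solve nums queries)

-- ===== LEMMAS AND PROOFS =====

-- the stride-suffix sum both programs compute, with explicit fuel
def gFuel (nums : List Int) (s : Nat) : Nat → Nat → Int
  | 0, _ => 0
  | f+1, i => if i < nums.length then nums.getD i 0 + gFuel nums s f (i + s) else 0

theorem gFuel_zero_of_ge (nums : List Int) (s f i : Nat) (h : nums.length ≤ i) :
    gFuel nums s f i = 0 := by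
  cases f with
  | zero => rfl
  | succ f => simp [gFuel]; omega

theorem gFuel_unfold (nums : List Int) (s g i : Nat) :
    gFuel nums s (g+1) i = if i < nums.length then nums.getD i 0 + gFuel nums s g (i + s) else 0 := rfl

theorem gFuel_succ_stable (nums : List Int) (s : Nat) (hs : 1 ≤ s) :
    ∀ (f i : Nat), nums.length ≤ i + f → gFuel nums s (f+1) i = gFuel nums s f i := by
  intro f
  induction f with
  | zero => intro i h; rw [gFuel_unfold]; rw [if_neg (by omega)]; rfl
  | succ f ih =>
    intro i h
    rw [gFuel_unfold nums s (f+1) i, gFuel_unfold nums s f i]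
    by_cases hi : i < nums.length
    · rw [if_pos hi, if_pos hi, ih (i + s) (by omega)]
    · rw [if_neg hi, if_neg hi]

theorem gFuel_add_stable (nums : List Int) (s : Nat) (hs : 1 ≤ s) (f i : Nat)
    (h : nums.length ≤ i + f) : ∀ k, gFuel nums s (f + k) i = gFuel nums s f i := by
  intro k
  induction k with
  | zero => rfl
  | succ k ih => rw [← ih, show f + (k+1) = (f + k) + 1 by ring,
      gFuel_succ_stable nums s hs (f + k) i (by omega)]

theorem gFuel_congr (nums : List Int) (s : Nat) (hs : 1 ≤ s) (f f' i : Nat)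
    (h : nums.length ≤ i + f) (h' : nums.length ≤ i + f') :
    gFuel nums s f i = gFuel nums s f' i := by
  rw [← gFuel_add_stable nums s hs f i h f', ← gFuel_add_stable nums s hs f' i h' f]
  ring_nf

-- canonical fuel: nums.length always suffices
theorem gFuel_eq_G (nums : List Int) (s : Nat) (hs : 1 ≤ s) (f i : Nat)
    (h : nums.length ≤ i + f) : gFuel nums s f i = gFuel nums s nums.length i := by
  exact gFuel_congr nums s hs f nums.length i h (by omega)

theorem G_unfold (nums : List Int) (s : Nat) (hs : 1 ≤ s) (i : Nat) (hi : i < nums.length) :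
    gFuel nums s nums.length i = nums.getD i 0 + gFuel nums s nums.length (i + s) := by
  obtain ⟨m, hm⟩ : ∃ m, nums.length = m + 1 := ⟨nums.length - 1, by omega⟩
  rw [hm, gFuel_unfold nums s m i, if_pos (by omega : i < nums.length),
    gFuel_congr nums s hs m (m+1) (i + s) (by omega) (by omega), ← hm]

theorem whileA_eq (nums : List Int) (step : Int) (hs : 1 ≤ step) :
    ∀ (f : Nat) (index total : Int), 0 ≤ index →
      whileSumA nums f index step total = total + gFuel nums step.toNat f index.toNat := by
  intro f
  induction f with
  | zero => intro index total _; simp [whileSumA, gFuel]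
  | succ f ih =>
    intro index total hind
    by_cases hi : index < (nums.length : Int)
    · simp only [whileSumA, if_pos hi, gFuel, if_pos (by omega : index.toNat < nums.length)]
      rw [ih (index + step) (total + PySem.List.pyGetD nums index 0) (by omega)]
      have hg : PySem.List.pyGetD nums index 0 = nums.getD index.toNat 0 := by
        have hc : index = ((index.toNat : Nat) : Int) := by omega
        rw [hc, PySem.List.pyGetD_natCast, Int.toNat_natCast]
      have h2 : (index + step).toNat = index.toNat + step.toNat := by omega
      rw [hg, h2]
      ring
    · simp only [whileSumA, if_neg hi, gFuel,
        if_neg (by omega : ¬ index.toNat < nums.length)]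
      ring

theorem whileB_eq_whileA (nums : List Int) :
    ∀ (f : Nat) (i step total : Int), whileSumB nums f i step total = whileSumA nums f i step total := by
  intro f
  induction f with
  | zero => intro i step total; rfl
  | succ f ih =>
    intro i step total
    simp only [whileSumB, whileSumA]
    split
    · exact ih _ _ _
    · rfl

-- every position of buildSuf holds the canonical stride sum
theorem buildSuf_fold (nums : List Int) (step : Int) (hs : 1 ≤ step) :
    ∀ (k : Nat), k ≤ nums.length → ∀ (suf : List Int),
      suf.length = ((nums.length : Int) + step).toNat →
      (∀ j : Nat, k ≤ j → suf.getD j 0 = gFuel nums step.toNat nums.length j) →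
      ∀ j : Nat,
        ((PySem.List.pyRange ((k : Int) - 1) (-1) (-1)).foldl
          (fun suf i =>
            PySem.List.pySetD suf i (PySem.List.pyGetD nums i 0 + PySem.List.pyGetD suf (i + step) 0))
          suf).getD j 0 = gFuel nums step.toNat nums.length j := by
  intro k
  induction k with
  | zero =>
    intro _ suf _ hsuf j
    rw [show ((0 : Nat) : Int) - 1 = -1 by norm_num,
      PySem.List.pyRange_neg_one_eq_nil (by norm_num)]
    exact hsuf j (Nat.zero_le j)
  | succ k ih =>
    intro hk suf hlen hsuf j
    have hr : PySem.List.pyRange (((k+1 : Nat) : Int) - 1) (-1) (-1)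
        = (k : Int) :: PySem.List.pyRange ((k : Int) - 1) (-1) (-1) := by
      have h1 : ((k+1 : Nat) : Int) - 1 = (k : Int) := by push_cast; ring
      rw [h1, PySem.List.pyRange_neg_one_cons (by omega)]
    rw [hr, List.foldl_cons]
    have hkl : k < nums.length := by omega
    have hsetlen : k < suf.length := by omega
    refine ih (by omega) _ ?_ ?_ j
    · rw [PySem.List.pySetD_natCast, List.length_set]; exact hlen
    · intro j hj
      rw [PySem.List.pySetD_natCast]
      rcases Nat.eq_or_lt_of_le hj with hje | hjg
      · subst hje
        rw [List.getD_eq_getElem _ _ (by simpa [List.length_set] using hsetlen),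
          List.getElem_set_self]
        have hgn : PySem.List.pyGetD nums (k : Int) 0 = nums.getD k 0 :=
          PySem.List.pyGetD_natCast nums k 0
        have hcast : (k : Int) + step = ((k + step.toNat : Nat) : Int) := by omega
        have hgs : PySem.List.pyGetD suf ((k : Int) + step) 0 = suf.getD (k + step.toNat) 0 := by
          rw [hcast, PySem.List.pyGetD_natCast]
        rw [hgn, hgs, hsuf (k + step.toNat) (by omega),
          G_unfold nums step.toNat (by omega) k hkl]
      · have : (suf.set k (PySem.List.pyGetD nums (k : Int) 0
            + PySem.List.pyGetD suf ((k : Int) + step) 0)).getD j 0 = suf.getD j 0 := by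
          simp [List.getD_eq_getElem?_getD, List.getElem?_set_ne (by omega : k ≠ j)]
        rw [this]
        exact hsuf j (by omega)

theorem buildSuf_getD (nums : List Int) (step : Int) (hs : 1 ≤ step) (j : Nat) :
    (buildSuf nums step).getD j 0 = gFuel nums step.toNat nums.length j := by
  unfold buildSuf
  have h := buildSuf_fold nums step hs nums.length (le_refl _)
    (List.replicate ((nums.length : Int) + step).toNat 0)
    (by simp) ?_ j
  · exact h
  · intro j hj
    rw [gFuel_zero_of_ge nums _ _ _ hj]
    simp [List.getD_eq_getElem?_getD, List.getElem?_replicate]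
    split <;> rfl

-- B's table lookup equals A's scan whenever start ≥ 0 and step ≥ 1
theorem tableVal (nums : List Int) (start step : Int) (hst : 0 ≤ start) (hs : 1 ≤ step) :
    (if start < (nums.length : Int) then PySem.List.pyGetD (buildSuf nums step) start 0 else 0)
      = whileSumA nums (2 * nums.length) start step 0 := by
  rw [whileA_eq nums step hs _ start 0 hst,
    gFuel_eq_G nums step.toNat (by omega) _ start.toNat (by omega)]
  by_cases h : start < (nums.length : Int)
  · rw [if_pos h]
    have hb : PySem.List.pyGetD (buildSuf nums step) start 0
        = (buildSuf nums step).getD start.toNat 0 := by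
      rw [show start = ((start.toNat : Nat) : Int) by omega, PySem.List.pyGetD_natCast,
        Int.toNat_natCast]
    rw [hb, buildSuf_getD nums step hs]
    ring
  · rw [if_neg h, gFuel_zero_of_ge nums _ _ _ (by omega)]
    ring

def cacheInv (nums : List Int) (cache : PySem.Dict Int (List Int)) : Prop :=
  ∀ k : Int, cache.contains k = true → cache.getD k [] = buildSuf nums k

theorem main_fold (nums : List Int) (freq : PySem.Dict Int Int) :
    ∀ (qs : List (List Int)) (cache : PySem.Dict Int (List Int)) (res : List Int),
      cacheInv nums cache →
      (qs.foldl
        (fun (acc : PySem.Dict Int (List Int) × List Int) q =>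
          let cache := acc.1
          let result := acc.2
          let start := PySem.List.pyGetD q 0 0
          let step := PySem.List.pyGetD q 1 0
          if 0 ≤ start ∧ 1 ≤ step ∧ step < freq.getD step 0 then
            let cache := if cache.contains step then cache else cache.insert step (buildSuf nums step)
            let suf := cache.getD step []
            (cache, result ++ [if start < (nums.length : Int) then PySem.List.pyGetD suf start 0 else 0])
          else
            (cache, result ++ [whileSumB nums (2 * nums.length) start step 0]))
        (cache, res)).2
      = qs.foldl
          (fun result query =>
            result ++ [whileSumA nums (2 * nums.length)
              (PySem.List.pyGetD query 0 0) (PySem.List.pyGetD query 1 0) 0])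
          res := by
  intro qs
  induction qs with
  | nil => intro cache res _; rfl
  | cons q qs ih =>
    intro cache res hinv
    simp only [List.foldl_cons]
    by_cases hbr : 0 ≤ PySem.List.pyGetD q 0 0 ∧ 1 ≤ PySem.List.pyGetD q 1 0 ∧
        PySem.List.pyGetD q 1 0 < freq.getD (PySem.List.pyGetD q 1 0) 0
    · rw [if_pos hbr]
      by_cases hc : cache.contains (PySem.List.pyGetD q 1 0) = true
      · rw [if_pos hc, hinv _ hc, tableVal nums _ _ hbr.1 hbr.2.1]
        exact ih cache _ hinv
      · rw [if_neg hc, PySem.Dict.getD_insert_self, tableVal nums _ _ hbr.1 hbr.2.1]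
        refine ih _ _ ?_
        intro k hk
        rw [PySem.Dict.getD_insert]
        by_cases hke : k = PySem.List.pyGetD q 1 0
        · rw [if_pos hke, hke]
        · rw [if_neg hke]
          refine hinv k ?_
          rw [PySem.Dict.contains_insert] at hk
          simpa [hke] using hk
    · rw [if_neg hbr, whileB_eq_whileA]
      exact ih cache _ hinv

-- ===== VERDICT (by name: the statement is the Claim_ definition above) =====
theorem solve_spec : Claim_equal_solve := by
  intro nums queries _hdom _hpre
  unfold Spec_solve solve solve_alt
  have hinv : cacheInv nums PySem.Dict.empty := by
    intro k hk
    simp [PySem.Dict.contains_empty] at hk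
  exact (main_fold nums _ queries PySem.Dict.empty [] hinv).symm
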